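-- pv_equiv track=rewrite | github.com/crmack/advent_of_code_2024 | days/day15.py | can_push_boxes
-- ===== SOURCE A (Python) =====
-- def can_push_boxes(box, boxes, walls, move_dir):
--     new_spot = [box[0] + move_dir[0], box[1] + move_dir[1]]
--     if new_spot in walls:
--         return False
--     elif new_spot in boxes:
--         return can_push_boxes(new_spot, boxes, walls, move_dir)
--     else:
--         return True
-- ===== SOURCE B (Python) =====
-- def can_push_boxes(box, boxes, walls, move_dir):
--     x, y = box[0], box[1]
--     dx, dy = move_dir[0], move_dir[1]
--     k = 1
--     while [x + k * dx, y + k * dy] in boxes and [x + k * dx, y + k * dy] not in walls: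
--         k += 1
--     return [x + k * dx, y + k * dy] not in walls
-- ===== Notes on version B (the rewrite author's own statement) =====
-- stated objective: alternative
-- what changed: Replaces A's recursion that rebuilds each successive cell from the previous one with a single while-loop over a step counter k, computing each probed cell in closed form as box + k*move_dir and deciding the answer by one final wall-membership test instead of per-call early returns.
import Mathlib
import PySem

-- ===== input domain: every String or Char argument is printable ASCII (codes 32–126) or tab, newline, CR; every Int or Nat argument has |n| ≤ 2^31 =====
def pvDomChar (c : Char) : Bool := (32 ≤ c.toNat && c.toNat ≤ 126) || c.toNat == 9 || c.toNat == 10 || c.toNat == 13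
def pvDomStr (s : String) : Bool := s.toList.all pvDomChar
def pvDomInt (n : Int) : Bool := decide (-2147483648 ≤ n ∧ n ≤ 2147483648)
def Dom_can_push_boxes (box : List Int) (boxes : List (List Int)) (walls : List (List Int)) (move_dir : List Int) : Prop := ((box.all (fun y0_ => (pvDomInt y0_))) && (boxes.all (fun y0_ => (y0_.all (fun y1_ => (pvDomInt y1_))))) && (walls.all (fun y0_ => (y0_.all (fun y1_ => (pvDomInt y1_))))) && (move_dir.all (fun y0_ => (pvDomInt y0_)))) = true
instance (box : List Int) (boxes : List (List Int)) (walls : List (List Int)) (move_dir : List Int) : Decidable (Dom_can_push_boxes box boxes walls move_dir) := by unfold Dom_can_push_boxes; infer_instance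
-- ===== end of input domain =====

-- B replaces A's recursion with a while-loop over a step counter k, probing box + k*move_dir
-- computed in closed form and deciding by one final wall test (objective: alternative, same cost).

-- ===== PORT A =====
-- fuel = boxes.length + 1 bounds the recursion depth; under Pre_ it is never exhausted
-- (each recursive step enters a distinct cell that is a member of boxes).
-- out-of-range box[i]/move_dir[i] (IndexError in Python) is defaulted with .getD 0; Pre_ excludes those inputs.
def canPushA (fuel : Nat) (box : List Int) (boxes : List (List Int)) (walls : List (List Int)) (move_dir : List Int) : Bool :=
  match fuel with
  | 0 => false
  | f+1 =>
    let new_spot : List Int :=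
      [(PySem.List.pyGet? box 0).getD 0 + (PySem.List.pyGet? move_dir 0).getD 0,
       (PySem.List.pyGet? box 1).getD 0 + (PySem.List.pyGet? move_dir 1).getD 0]
    if new_spot ∈ walls then false
    else if new_spot ∈ boxes then canPushA f new_spot boxes walls move_dir
    else true

def can_push_boxes (box : List Int) (boxes : List (List Int)) (walls : List (List Int)) (move_dir : List Int) : Bool :=
  canPushA (boxes.length + 1) box boxes walls move_dir

-- ===== PORT B =====
-- the while-loop of Source B; fuel = boxes.length + 1 bounds its iterations, never exhausted under Pre_.
def canPushB (fuel : Nat) (x y dx dy : Int) (boxes : List (List Int)) (walls : List (List Int)) (k : Int) : Bool :=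
  match fuel with
  | 0 => false
  | f+1 =>
    if [x + k * dx, y + k * dy] ∈ boxes ∧ [x + k * dx, y + k * dy] ∉ walls then
      canPushB f x y dx dy boxes walls (k + 1)
    else
      decide ([x + k * dx, y + k * dy] ∉ walls)

def can_push_boxes_alt (box : List Int) (boxes : List (List Int)) (walls : List (List Int)) (move_dir : List Int) : Bool :=
  canPushB (boxes.length + 1)
    ((PySem.List.pyGet? box 0).getD 0) ((PySem.List.pyGet? box 1).getD 0)
    ((PySem.List.pyGet? move_dir 0).getD 0) ((PySem.List.pyGet? move_dir 1).getD 0)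
    boxes walls 1

-- ===== PRECONDITION & SPEC =====
-- Pre_ is exactly where Python A returns normally: box and move_dir long enough for box[1]/move_dir[1]
-- (else IndexError), and either a nonzero move direction or an immediately terminating first cell
-- (a zero direction whose first probed cell is a non-wall box recurses forever: RecursionError).
def Pre_can_push_boxes (box : List Int) (boxes : List (List Int)) (walls : List (List Int)) (move_dir : List Int) : Prop :=
  2 ≤ box.length ∧ 2 ≤ move_dir.length ∧
  (((PySem.List.pyGet? move_dir 0).getD 0 ≠ 0 ∨ (PySem.List.pyGet? move_dir 1).getD 0 ≠ 0) ∨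
   [(PySem.List.pyGet? box 0).getD 0 + (PySem.List.pyGet? move_dir 0).getD 0,
    (PySem.List.pyGet? box 1).getD 0 + (PySem.List.pyGet? move_dir 1).getD 0] ∈ walls ∨
   [(PySem.List.pyGet? box 0).getD 0 + (PySem.List.pyGet? move_dir 0).getD 0,
    (PySem.List.pyGet? box 1).getD 0 + (PySem.List.pyGet? move_dir 1).getD 0] ∉ boxes)
instance (box : List Int) (boxes : List (List Int)) (walls : List (List Int)) (move_dir : List Int) : Decidable (Pre_can_push_boxes box boxes walls move_dir) := by unfold Pre_can_push_boxes; infer_instance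

def pvWitness_can_push_boxes : List Int × List (List Int) × List (List Int) × List Int :=
  ([0, 0], [[1, 0]], [[2, 0]], [1, 0])

def Spec_can_push_boxes (box : List Int) (boxes : List (List Int)) (walls : List (List Int)) (move_dir : List Int) (out : Bool) : Prop := out = can_push_boxes_alt box boxes walls move_dir
instance (box : List Int) (boxes : List (List Int)) (walls : List (List Int)) (move_dir : List Int) (out : Bool) : Decidable (Spec_can_push_boxes box boxes walls move_dir out) := by unfold Spec_can_push_boxes; infer_instance

-- ===== CLAIM (what is proved, stated in full; the proofs are below) =====
def Claim_equal_can_push_boxes : Prop := ∀ (box : List Int) (boxes : List (List Int)) (walls : List (List Int)) (move_dir : List Int), Dom_can_push_boxes box boxes walls move_dir → Pre_can_push_boxes box boxes walls move_dir → Spec_can_push_boxes box boxes walls move_dir (can_push_boxes box boxes walls move_dir)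

-- ===== LEMMAS AND PROOFS =====

theorem canPushA_eq_canPushB (boxes walls : List (List Int)) (move_dir : List Int)
    (x y dx dy : Int)
    (hdx : (PySem.List.pyGet? move_dir 0).getD 0 = dx)
    (hdy : (PySem.List.pyGet? move_dir 1).getD 0 = dy) :
    ∀ (f : Nat) (k : Int),
      canPushA f [x + k * dx, y + k * dy] boxes walls move_dir
      = canPushB f x y dx dy boxes walls (k + 1) := by
  intro f
  induction f with
  | zero => intro k; rfl
  | succ f ih =>
    intro k
    have h1 : (x + k * dx + dx : Int) = x + (k + 1) * dx := by ring
    have h2 : (y + k * dy + dy : Int) = y + (k + 1) * dy := by ring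
    simp only [canPushA, canPushB]
    by_cases hw : ([x + (k + 1) * dx, y + (k + 1) * dy] : List Int) ∈ walls <;>
      by_cases hb : ([x + (k + 1) * dx, y + (k + 1) * dy] : List Int) ∈ boxes <;>
        simp [hdx, hdy, h1, h2, hw, hb, ih (k + 1)]

-- ===== VERDICT (by name: the statement is the Claim_ definition above) =====
theorem can_push_boxes_spec : Claim_equal_can_push_boxes := by
  intro box boxes walls move_dir _ _
  unfold Spec_can_push_boxes can_push_boxes can_push_boxes_alt
  have key := canPushA_eq_canPushB boxes walls move_dir
      ((PySem.List.pyGet? box 0).getD 0) ((PySem.List.pyGet? box 1).getD 0)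
      ((PySem.List.pyGet? move_dir 0).getD 0) ((PySem.List.pyGet? move_dir 1).getD 0)
      rfl rfl boxes.length 1
  simp only [canPushA, canPushB]
  generalize hx : (PySem.List.pyGet? box 0).getD 0 = x at key ⊢
  generalize hy : (PySem.List.pyGet? box 1).getD 0 = y at key ⊢
  generalize hdx : (PySem.List.pyGet? move_dir 0).getD 0 = dx at key ⊢
  generalize hdy : (PySem.List.pyGet? move_dir 1).getD 0 = dy at key ⊢
  simp only [one_mul] at key
  by_cases hw : ([x + dx, y + dy] : List Int) ∈ walls <;>
    by_cases hb : ([x + dx, y + dy] : List Int) ∈ boxes <;>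
      simp [hw, hb, key]
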